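-- pv_equiv track=rewrite | github.com/aaaAlexanderaaa/app_control | tools/generate_overview.py | prefix_kind
-- ===== SOURCE A (Python) =====
-- MACHINE_PREFIXES = {
--     "api",
--     "auth",
--     "cdn",
--     "config",
--     "configdl",
--     "download",
--     "downloads",
--     "files",
--     "img",
--     "login",
--     "relay",
--     "service",
--     "static",
--     "telemetry",
--     "update",
--     "updates",
--     "webapi",
-- }
--
-- HUMAN_LABELS = {"www", "docs", "help", "support"}
--
-- def prefix_kind(label: str) -> str:
--     normalized = label.lower()
--     if normalized in HUMAN_LABELS:
--         return "human"
--     for prefix in MACHINE_PREFIXES: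
--         if normalized == prefix or normalized.startswith(prefix):
--             return "machine"
--     return "other"
-- ===== SOURCE B (Python) =====
-- MACHINE_PREFIXES = {
--     "api", "auth", "cdn", "config", "configdl", "download", "downloads",
--     "files", "img", "login", "relay", "service", "static", "telemetry",
--     "update", "updates", "webapi",
-- }
--
-- HUMAN_LABELS = {"www", "docs", "help", "support"}
--
-- _MAX_PREFIX_LEN = max(len(p) for p in MACHINE_PREFIXES)
--
--
-- def prefix_kind(label: str) -> str:
--     normalized = label.lower()
--     if normalized in HUMAN_LABELS:
--         return "human"
--     for i in range(1, min(len(normalized), _MAX_PREFIX_LEN) + 1):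
--         if normalized[:i] in MACHINE_PREFIXES:
--             return "machine"
--     return "other"
-- ===== Notes on version B (the rewrite author's own statement) =====
-- stated objective: alternative
-- what changed: Instead of scanning the prefix set and testing startswith for each entry, B walks the input's own leading slices up to the longest set entry's length and classifies on the first hash-set hit, using the set purely as a lookup table.
import Mathlib
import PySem

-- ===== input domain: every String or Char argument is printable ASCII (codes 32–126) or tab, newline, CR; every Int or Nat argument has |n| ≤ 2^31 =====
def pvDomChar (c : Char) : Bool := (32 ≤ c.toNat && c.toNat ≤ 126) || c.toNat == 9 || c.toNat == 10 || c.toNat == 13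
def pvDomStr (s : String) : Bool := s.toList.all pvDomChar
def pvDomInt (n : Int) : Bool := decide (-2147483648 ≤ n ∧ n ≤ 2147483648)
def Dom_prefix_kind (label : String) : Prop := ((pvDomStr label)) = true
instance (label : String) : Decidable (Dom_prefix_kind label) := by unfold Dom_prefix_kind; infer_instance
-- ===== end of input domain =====

-- B walks the input's own prefixes and looks each up in the machine-prefix set,
-- instead of scanning the set with startswith tests (alternative algorithm, same results).

-- ===== PORT A =====
def pvMachinePrefixes : List (List Char) :=
  ["api".toList, "auth".toList, "cdn".toList, "config".toList, "configdl".toList,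
   "download".toList, "downloads".toList, "files".toList, "img".toList, "login".toList,
   "relay".toList, "service".toList, "static".toList, "telemetry".toList,
   "update".toList, "updates".toList, "webapi".toList]

def pvHumanLabels : List (List Char) :=
  ["www".toList, "docs".toList, "help".toList, "support".toList]

-- the 'for prefix in MACHINE_PREFIXES' loop with its early return
def pvLoopA (n : List Char) : List (List Char) → String
  | [] => "other"
  | p :: ps => if n = p ∨ PySem.Chars.startswith n p then "machine" else pvLoopA n ps

def prefix_kind (label : String) : String :=
  let normalized := PySem.Chars.lower label.toList
  if normalized ∈ pvHumanLabels then "human" else pvLoopA normalized pvMachinePrefixes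

-- ===== PORT B =====
def pvMaxPrefixLen : Nat :=
  ((pvMachinePrefixes.map List.length).max?).getD 0

-- the 'for i in range(1, min(len(normalized), _MAX_PREFIX_LEN) + 1)' loop with its early return
def pvLoopB (n : List Char) (i : Nat) : String :=
  if h : i ≤ min n.length pvMaxPrefixLen then
    if PySem.List.slice n none (some (i : Int)) ∈ pvMachinePrefixes then "machine"
    else pvLoopB n (i + 1)
  else "other"
termination_by min n.length pvMaxPrefixLen + 1 - i

def prefix_kind_alt (label : String) : String :=
  let normalized := PySem.Chars.lower label.toList
  if normalized ∈ pvHumanLabels then "human" else pvLoopB normalized 1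

-- ===== PRECONDITION & SPEC =====
def Spec_prefix_kind (label : String) (out : String) : Prop := out = prefix_kind_alt label
instance (label : String) (out : String) : Decidable (Spec_prefix_kind label out) := by unfold Spec_prefix_kind; infer_instance

-- ===== CLAIM (what is proved, stated in full; the proofs are below) =====
def Claim_equal_prefix_kind : Prop := ∀ (label : String), Dom_prefix_kind label → Spec_prefix_kind label (prefix_kind label)

-- ===== LEMMAS AND PROOFS =====

lemma pvLoopA_machine_iff (n : List Char) (ps : List (List Char)) :
    pvLoopA n ps = "machine" ↔ ∃ p ∈ ps, p <+: n := by
  induction ps with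
  | nil => simp [pvLoopA]
  | cons p ps ih =>
    by_cases h : p <+: n
    · have hsw : PySem.Chars.startswith n p = true := (PySem.Chars.startswith_iff n p).mpr h
      simp [pvLoopA, hsw, h]
    · have hne : n ≠ p := by rintro rfl; exact h (List.prefix_refl n)
      have hsw : ¬ (PySem.Chars.startswith n p = true) :=
        fun hc => h ((PySem.Chars.startswith_iff n p).mp hc)
      rw [pvLoopA, if_neg (by tauto), ih]
      constructor
      · rintro ⟨q, hq, hqp⟩; exact ⟨q, List.mem_cons_of_mem p hq, hqp⟩
      · rintro ⟨q, hq, hqp⟩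
        rcases List.mem_cons.mp hq with rfl | hq'
        · exact absurd hqp h
        · exact ⟨q, hq', hqp⟩

lemma pvLoopA_cases (n : List Char) (ps : List (List Char)) :
    pvLoopA n ps = "machine" ∨ pvLoopA n ps = "other" := by
  induction ps with
  | nil => simp [pvLoopA]
  | cons p ps ih =>
    rw [pvLoopA]
    split
    · left; rfl
    · exact ih

lemma pvLoopB_machine_iff (n : List Char) (i : Nat) :
    pvLoopB n i = "machine" ↔
      ∃ j, i ≤ j ∧ j ≤ min n.length pvMaxPrefixLen ∧ n.take j ∈ pvMachinePrefixes := by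
  by_cases h : i ≤ min n.length pvMaxPrefixLen
  · rw [pvLoopB, dif_pos h]
    have hslice : PySem.List.slice n none (some (i : Int)) = n.take i := by
      rw [PySem.List.slice_to n (b := (i : Int)) (by positivity)]; simp
    rw [hslice]
    by_cases hm : n.take i ∈ pvMachinePrefixes
    · rw [if_pos hm]
      exact iff_of_true rfl ⟨i, le_refl i, h, hm⟩
    · rw [if_neg hm, pvLoopB_machine_iff n (i + 1)]
      constructor
      · rintro ⟨j, hj1, hj2, hj3⟩; exact ⟨j, by omega, hj2, hj3⟩
      · rintro ⟨j, hj1, hj2, hj3⟩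
        rcases Nat.eq_or_lt_of_le hj1 with rfl | hlt
        · exact absurd hj3 hm
        · exact ⟨j, hlt, hj2, hj3⟩
  · rw [pvLoopB, dif_neg h]
    constructor
    · intro hc; exact absurd hc (by decide)
    · rintro ⟨j, hj1, hj2, _⟩; omega
termination_by min n.length pvMaxPrefixLen + 1 - i

lemma pvLoopB_cases (n : List Char) (i : Nat) :
    pvLoopB n i = "machine" ∨ pvLoopB n i = "other" := by
  by_cases h : i ≤ min n.length pvMaxPrefixLen
  · rw [pvLoopB, dif_pos h]
    split
    · left; rfl
    · exact pvLoopB_cases n (i + 1)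
  · rw [pvLoopB, dif_neg h]; right; rfl
termination_by min n.length pvMaxPrefixLen + 1 - i

lemma pv_cond_iff (n : List Char) :
    (∃ p ∈ pvMachinePrefixes, p <+: n) ↔
      ∃ j, 1 ≤ j ∧ j ≤ min n.length pvMaxPrefixLen ∧ n.take j ∈ pvMachinePrefixes := by
  constructor
  · rintro ⟨p, hp, hpre⟩
    have hne : ∀ q ∈ pvMachinePrefixes, q ≠ [] := by decide
    have hlen : ∀ q ∈ pvMachinePrefixes, q.length ≤ pvMaxPrefixLen := by decide
    refine ⟨p.length, ?_, ?_, ?_⟩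
    · have : 0 < p.length := List.length_pos_of_ne_nil (hne p hp)
      omega
    · have h1 := hpre.length_le
      have h2 := hlen p hp
      omega
    · rw [← List.prefix_iff_eq_take.mp hpre]; exact hp
  · rintro ⟨j, _, _, hm⟩
    exact ⟨n.take j, hm, List.take_prefix j n⟩

-- ===== VERDICT (by name: the statement is the Claim_ definition above) =====
theorem prefix_kind_spec : Claim_equal_prefix_kind := by
  intro label _
  unfold Spec_prefix_kind prefix_kind prefix_kind_alt
  set n := PySem.Chars.lower label.toList with hn
  by_cases hh : n ∈ pvHumanLabels
  · simp [hh]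
  · rw [if_neg hh, if_neg hh]
    rcases pvLoopA_cases n pvMachinePrefixes with hA | hA
    · rw [hA, ((pvLoopB_machine_iff n 1).mpr
        ((pv_cond_iff n).mp ((pvLoopA_machine_iff n pvMachinePrefixes).mp hA))).symm]
    · rcases pvLoopB_cases n 1 with hB | hB
      · exact absurd ((pvLoopA_machine_iff n pvMachinePrefixes).mpr
          ((pv_cond_iff n).mpr ((pvLoopB_machine_iff n 1).mp hB))) (by rw [hA]; decide)
      · rw [hA, hB]
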